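-- pv_equiv track=rewrite | github.com/lei8c8/leetcode_2020_learning | hash_table/minimum_index_sum.py | findRestaurant
-- ===== SOURCE A (Python) =====
-- from typing import List
--
-- def findRestaurant(list1: List[str], list2: List[str]) -> List[str]:
--     set1, set2, ans = set(list1), set(list2), []
--     lookup1, lookup2, res, both = {}, {}, [], set1 & set2
--     for i, v in enumerate(list1):
--         lookup1[v] = i
--     for i, v in enumerate(list2):
--         lookup2[v] = i
--     for r in both:
--         res.append((r, lookup1[r] + lookup2[r]))
--     res.sort(key = lambda x: x[1])
--     min_val = res[0][1]
--     for r in res: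
--         if r[1] == min_val:
--             ans.append(r[0])
--         else:
--             break
--     return ans
-- ===== SOURCE B (Python) =====
-- from typing import List
--
-- def findRestaurant(list1: List[str], list2: List[str]) -> List[str]:
--     pos1 = {v: i for i, v in enumerate(list1)}
--     pos2 = {v: i for i, v in enumerate(list2)}
--     common = [v for v in pos2 if v in pos1]
--     if not common:
--         return []
--     best = min(pos1[v] + pos2[v] for v in common)
--     return [v for v in common if pos1[v] + pos2[v] == best]
-- ===== Notes on version B (the rewrite author's own statement) =====
-- stated objective: alternative
-- what changed: B replaces A's build-tuples-over-a-set / sort-by-sum / scan-until-break pipeline with a sort-free min-then-filter: one min() over the common keys followed by one filter collecting the entries that attain it, in dict (first-occurrence of list2) order.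
-- outside the precondition, e.g. on findRestaurant(['a', 'b'], ['b', 'a']): A returns ['a', 'b'], B returns ['b', 'a']
import Mathlib
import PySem

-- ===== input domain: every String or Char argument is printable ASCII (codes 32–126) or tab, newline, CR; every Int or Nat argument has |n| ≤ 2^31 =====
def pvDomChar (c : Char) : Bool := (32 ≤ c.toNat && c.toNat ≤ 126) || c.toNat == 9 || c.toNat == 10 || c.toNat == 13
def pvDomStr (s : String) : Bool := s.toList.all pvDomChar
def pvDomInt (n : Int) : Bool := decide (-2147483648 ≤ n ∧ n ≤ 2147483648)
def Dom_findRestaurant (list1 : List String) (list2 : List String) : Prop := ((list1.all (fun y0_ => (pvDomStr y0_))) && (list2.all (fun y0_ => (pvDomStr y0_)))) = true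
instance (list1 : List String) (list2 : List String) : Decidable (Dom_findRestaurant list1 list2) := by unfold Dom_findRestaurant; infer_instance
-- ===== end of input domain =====

-- B replaces A's sort-by-index-sum pipeline with a sort-free min-then-filter over the common keys (alternative algorithm, no sort).


-- ===== PORT A =====
def findRestaurant (list1 : List String) (list2 : List String) : List String :=
  let set1 : PySem.Set String := PySem.Set.ofList list1
  let set2 : PySem.Set String := PySem.Set.ofList list2
  -- for i, v in enumerate(list1): lookup1[v] = i   (a later occurrence overwrites)
  let lookup1 := (PySem.List.enumerate list1).foldl (fun d p => d.insert p.2 p.1)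
      (PySem.Dict.empty (κ := String) (ν := Int))
  let lookup2 := (PySem.List.enumerate list2).foldl (fun d p => d.insert p.2 p.1)
      (PySem.Dict.empty (κ := String) (ν := Int))
  let both := PySem.Set.inter set1 set2
  -- lookup1[r] / lookup2[r]: r ∈ both is a key of both dicts, so the getD default is never used
  let res := both.foldl (fun acc r => acc ++ [(r, lookup1.getD r 0 + lookup2.getD r 0)]) []
  let res := PySem.List.sorted res (fun x => x.2) false
  -- res[0][1]: Python raises IndexError when res is empty; Pre_ excludes that, so the pyGetD default is never used
  let min_val := (PySem.List.pyGetD res 0 ("", 0)).2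
  -- for r in res: append while r[1] == min_val, break at the first larger sum
  (res.takeWhile (fun r => decide (r.2 = min_val))).map (fun r => r.1)

-- ===== PORT B =====
def findRestaurant_alt (list1 : List String) (list2 : List String) : List String :=
  let pos1 := (PySem.List.enumerate list1).foldl (fun d p => d.insert p.2 p.1)
      (PySem.Dict.empty (κ := String) (ν := Int))
  let pos2 := (PySem.List.enumerate list2).foldl (fun d p => d.insert p.2 p.1)
      (PySem.Dict.empty (κ := String) (ν := Int))
  let common := (PySem.Dict.keys pos2).filter (fun v => PySem.Dict.contains pos1 v)
  if common.isEmpty then []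
  else
    let best := (PySem.List.min? (common.map (fun v => pos1.getD v 0 + pos2.getD v 0)) (fun s => s)).getD 0
    common.filter (fun v => decide (pos1.getD v 0 + pos2.getD v 0 = best))

-- ===== PRECONDITION & SPEC =====
-- index of the LAST occurrence of v in l (meaningful when v ∈ l)
def pvLastIdx (l : List String) (v : String) : Int :=
  (l.length : Int) - 1 - (l.reverse.idxOf v : Int)
def pvIdxSum (list1 : List String) (list2 : List String) (v : String) : Int :=
  pvLastIdx list1 v + pvLastIdx list2 v

-- Pre_ excludes (i) inputs with no common restaurant, where A raises IndexError on res[0], and (ii) inputs where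
-- several common restaurants tie for the minimum index sum, where A's output order is Python's set hash order (accidental).
def Pre_findRestaurant (list1 : List String) (list2 : List String) : Prop :=
  ∃ v ∈ list1, v ∈ list2 ∧
    ∀ w ∈ list1, w ∈ list2 → w ≠ v → pvIdxSum list1 list2 v < pvIdxSum list1 list2 w
instance (list1 : List String) (list2 : List String) : Decidable (Pre_findRestaurant list1 list2) := by
  unfold Pre_findRestaurant; infer_instance

def pvWitness_findRestaurant : List String × List String := (["a", "b"], ["b", "c"])

def Spec_findRestaurant (list1 : List String) (list2 : List String) (out : List String) : Prop :=
  out = findRestaurant_alt list1 list2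
instance (list1 : List String) (list2 : List String) (out : List String) : Decidable (Spec_findRestaurant list1 list2 out) := by
  unfold Spec_findRestaurant; infer_instance

-- ===== CLAIM (what is proved, stated in full; the proofs are below) =====
def Claim_equal_findRestaurant : Prop := ∀ (list1 : List String) (list2 : List String), Dom_findRestaurant list1 list2 → Pre_findRestaurant list1 list2 → Spec_findRestaurant list1 list2 (findRestaurant list1 list2)

-- ===== LEMMAS AND PROOFS =====

-- the index dict built by the enumerate/insert loop: lookup at a present key is the last index
theorem pvDict_getD (l : List String) (v : String) (hv : v ∈ l) :
    (((PySem.List.enumerate l).foldl (fun d p => d.insert p.2 p.1)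
      (PySem.Dict.empty (κ := String) (ν := Int))).getD v 0) = pvLastIdx l v := by
  induction l using List.reverseRecOn with
  | nil => simp at hv
  | append_singleton xs x ih =>
    rw [PySem.List.enumerate_append, List.foldl_append]
    simp only [PySem.List.enumerate_cons, PySem.List.enumerate_nil, List.foldl_cons, List.foldl_nil]
    rw [PySem.Dict.getD_insert]
    unfold pvLastIdx
    by_cases hvx : v = x
    · subst hvx
      simp
    · rw [if_neg hvx]
      have hv' : v ∈ xs := by
        rcases List.mem_append.mp hv with h | h
        · exact h
        · simp at h; exact absurd h hvx
      rw [ih hv']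
      unfold pvLastIdx
      have : (xs ++ [x]).reverse.idxOf v = xs.reverse.idxOf v + 1 := by
        simp [show x ≠ v from fun h => hvx h.symm]
      rw [this]
      simp
      ring

-- keys of that dict, in order: the distinct elements of l in first-occurrence order
theorem pvDict_keys (l : List String) :
    ((PySem.List.enumerate l).foldl (fun d p => d.insert p.2 p.1)
      (PySem.Dict.empty (κ := String) (ν := Int))).keys = PySem.Set.ofList l := by
  have h := PySem.Dict.keys_foldl_insert_key (ν := Int) (PySem.List.enumerate l)
      (fun p => p.2) (fun _ p => p.1) PySem.Dict.empty
  simpa [PySem.List.map_snd_enumerate, PySem.Set.update_nil_left] using h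

theorem pvDict_contains (l : List String) (v : String) :
    ((PySem.List.enumerate l).foldl (fun d p => d.insert p.2 p.1)
      (PySem.Dict.empty (κ := String) (ν := Int))).contains v = decide (v ∈ l) := by
  rw [PySem.Dict.contains_eq_decide_mem_keys, pvDict_keys]
  simp [PySem.Set.mem_ofList]

-- a Nodup list whose predicate holds exactly at one member filters to the singleton
theorem pvFilter_unique {α : Type} (L : List α) (p : α → Bool) (v : α)
    (hnd : L.Nodup) (hv : v ∈ L) (hp : ∀ w ∈ L, p w = true ↔ w = v) :
    L.filter p = [v] := by
  induction L with
  | nil => simp at hv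
  | cons a L ih =>
    rcases List.nodup_cons.mp hnd with ⟨hna, hndL⟩
    by_cases hav : a = v
    · subst hav
      have hpa : p a = true := (hp a (by simp)).mpr rfl
      have hnone : ∀ w ∈ L, ¬ p w = true := by
        intro w hw hpw
        have := (hp w (by simp [hw])).mp hpw
        exact hna (this ▸ hw)
      simp only [List.filter_cons, hpa]
      have : L.filter p = [] := List.filter_eq_nil_iff.mpr hnone
      simp [this]
    · have hpa : p a = false := by
        rcases Bool.eq_false_or_eq_true (p a) with h | h
        · exact absurd ((hp a (by simp)).mp h) hav
        · exact h
      have hvL : v ∈ L := by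
        rcases List.mem_cons.mp hv with h | h
        · exact absurd h.symm hav
        · exact h
      simp only [List.filter_cons, hpa]
      exact ih hndL hvL (fun w hw => hp w (by simp [hw]))

-- A's pipeline returns exactly the unique minimizer
theorem pvA_eq (list1 list2 : List String) (v : String) (hv1 : v ∈ list1) (hv2 : v ∈ list2)
    (hmin : ∀ w ∈ list1, w ∈ list2 → w ≠ v → pvIdxSum list1 list2 v < pvIdxSum list1 list2 w) :
    findRestaurant list1 list2 = [v] := by
  unfold findRestaurant
  dsimp only
  set d1 := (PySem.List.enumerate list1).foldl (fun d p => d.insert p.2 p.1)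
      (PySem.Dict.empty (κ := String) (ν := Int)) with hd1
  set d2 := (PySem.List.enumerate list2).foldl (fun d p => d.insert p.2 p.1)
      (PySem.Dict.empty (κ := String) (ν := Int)) with hd2
  set L := PySem.Set.inter (PySem.Set.ofList list1) (PySem.Set.ofList list2) with hL
  have hmemL : ∀ w, w ∈ L ↔ w ∈ list1 ∧ w ∈ list2 := by
    intro w
    simp [hL, PySem.Set.mem_inter, PySem.Set.mem_ofList]
  have hndL : L.Nodup := PySem.Set.nodup_inter _ _ (PySem.Set.nodup_ofList list1)
  have hvL : v ∈ L := (hmemL v).mpr ⟨hv1, hv2⟩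
  have hfold : L.foldl (fun acc r => acc ++ [(r, d1.getD r 0 + d2.getD r 0)]) [] =
      L.map (fun r => (r, d1.getD r 0 + d2.getD r 0)) := by
    simpa using PySem.List.foldl_append_singleton_eq_map
      (fun r => (r, d1.getD r 0 + d2.getD r 0)) L []
  have hmap : L.map (fun r => (r, d1.getD r 0 + d2.getD r 0)) =
      L.map (fun r => (r, pvIdxSum list1 list2 r)) := by
    apply List.map_congr_left
    intro w hw
    rcases (hmemL w).mp hw with ⟨h1, h2⟩
    rw [hd1, hd2, pvDict_getD list1 w h1, pvDict_getD list2 w h2]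
    rfl
  rw [hfold, hmap]
  set M := L.map (fun r => (r, pvIdxSum list1 list2 r)) with hM
  have hndM : M.Nodup := List.Nodup.map (fun a b h => congrArg Prod.fst h) hndL
  have hvM : (v, pvIdxSum list1 list2 v) ∈ M := List.mem_map.mpr ⟨v, hvL, rfl⟩
  set S := PySem.List.sorted M (fun x => x.2) false with hS
  have hndS : S.Nodup := ((PySem.List.sorted_perm M (fun x => x.2) false).nodup_iff).mpr hndM
  have hSne : S ≠ [] := by
    intro h
    rw [PySem.List.sorted_eq_nil_iff] at h
    rw [h] at hvM
    simp at hvM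
  obtain ⟨m, t, hcons⟩ := List.exists_cons_of_ne_nil hSne
  have hmM : m ∈ M := (PySem.List.mem_sorted _ _ _ _).mp (hcons ▸ List.mem_cons_self)
  obtain ⟨w, hwL, hmw⟩ := List.mem_map.mp hmM
  have hle : m.2 ≤ pvIdxSum list1 list2 v :=
    PySem.List.key_head_sorted_le M (fun x => x.2) hcons _ hvM
  have hwv : w = v := by
    by_contra hne
    rcases (hmemL w).mp hwL with ⟨h1, h2⟩
    have := hmin w h1 h2 hne
    rw [← hmw] at hle
    simp at hle
    omega
  have hm : m = (v, pvIdxSum list1 list2 v) := by rw [← hmw, hwv]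
  rw [hcons]
  have hget : (PySem.List.pyGetD (m :: t) (0 : Int) ("", (0 : Int))) = m := by
    simp [PySem.List.pyGetD, PySem.List.pyGet?, PySem.List.pyIdx?]
  rw [hget]
  have htw : (m :: t).takeWhile (fun r => decide (r.2 = m.2)) = [m] := by
    cases t with
    | nil => simp
    | cons m2 t2 =>
      have hm2S : m2 ∈ S := by rw [hcons]; simp
      have hm2M : m2 ∈ M := (PySem.List.mem_sorted _ _ _ _).mp hm2S
      obtain ⟨w2, hw2L, hm2w⟩ := List.mem_map.mp hm2M
      have hne2 : m2.2 ≠ m.2 := by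
        intro heq
        have hw2v : w2 = v := by
          by_contra hne
          rcases (hmemL w2).mp hw2L with ⟨h1, h2⟩
          have := hmin w2 h1 h2 hne
          rw [← hm2w] at heq
          rw [hm] at heq
          simp at heq
          omega
        have : m2 = m := by rw [← hm2w, hw2v, hm]
        rw [hcons] at hndS
        rcases List.nodup_cons.mp hndS with ⟨hnm, _⟩
        exact hnm (this ▸ List.mem_cons_self)
      simp [hne2]
  rw [htw, hm]
  simp

-- B's min-then-filter returns exactly the unique minimizer
theorem pvB_eq (list1 list2 : List String) (v : String) (hv1 : v ∈ list1) (hv2 : v ∈ list2)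
    (hmin : ∀ w ∈ list1, w ∈ list2 → w ≠ v → pvIdxSum list1 list2 v < pvIdxSum list1 list2 w) :
    findRestaurant_alt list1 list2 = [v] := by
  unfold findRestaurant_alt
  dsimp only
  set d1 := (PySem.List.enumerate list1).foldl (fun d p => d.insert p.2 p.1)
      (PySem.Dict.empty (κ := String) (ν := Int)) with hd1
  set d2 := (PySem.List.enumerate list2).foldl (fun d p => d.insert p.2 p.1)
      (PySem.Dict.empty (κ := String) (ν := Int)) with hd2
  set C := (PySem.Dict.keys d2).filter (fun w => PySem.Dict.contains d1 w) with hC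
  have hmemC : ∀ w, w ∈ C ↔ w ∈ list1 ∧ w ∈ list2 := by
    intro w
    rw [hC, hd1, hd2, pvDict_keys]
    simp only [List.mem_filter, pvDict_contains, PySem.Set.mem_ofList, decide_eq_true_eq]
    exact and_comm
  have hndC : C.Nodup := by
    rw [hC, hd2, pvDict_keys]
    exact List.Nodup.filter _ (PySem.Set.nodup_ofList list2)
  have hvC : v ∈ C := (hmemC v).mpr ⟨hv1, hv2⟩
  have hg : ∀ w ∈ C, d1.getD w 0 + d2.getD w 0 = pvIdxSum list1 list2 w := by
    intro w hw
    rcases (hmemC w).mp hw with ⟨h1, h2⟩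
    rw [hd1, hd2, pvDict_getD list1 w h1, pvDict_getD list2 w h2]
    rfl
  have hCne : C.isEmpty = false := by
    cases hc : C with
    | nil => rw [hc] at hvC; simp at hvC
    | cons a t => simp
  rw [if_neg (by simp only [hCne]; simp)]
  have hmapC : C.map (fun w => d1.getD w 0 + d2.getD w 0) =
      C.map (fun w => pvIdxSum list1 list2 w) := List.map_congr_left hg
  rw [hmapC]
  have hfvmem : pvIdxSum list1 list2 v ∈ C.map (fun w => pvIdxSum list1 list2 w) :=
    List.mem_map.mpr ⟨v, hvC, rfl⟩
  obtain ⟨m, hmeq⟩ : ∃ m, PySem.List.min? (C.map (fun w => pvIdxSum list1 list2 w)) (fun s => s) = some m := by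
    cases hmq : PySem.List.min? (C.map (fun w => pvIdxSum list1 list2 w)) (fun s => s) with
    | none =>
      rw [PySem.List.min?_eq_none_iff] at hmq
      rw [hmq] at hfvmem
      simp at hfvmem
    | some m => exact ⟨m, rfl⟩
  have hmval : m = pvIdxSum list1 list2 v := by
    have hle : m ≤ pvIdxSum list1 list2 v := PySem.List.min?_isMin hmeq _ hfvmem
    obtain ⟨w, hwC, hmw⟩ := List.mem_map.mp (PySem.List.min?_mem hmeq)
    by_cases hwv : w = v
    · rw [← hmw, hwv]
    · rcases (hmemC w).mp hwC with ⟨h1, h2⟩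
      have := hmin w h1 h2 hwv
      omega
  rw [hmeq]
  simp only [Option.getD_some, hmval]
  apply pvFilter_unique C _ v hndC hvC
  intro w hw
  rw [hg w hw]
  simp only [decide_eq_true_eq]
  constructor
  · intro heq
    by_contra hne
    rcases (hmemC w).mp hw with ⟨h1, h2⟩
    have := hmin w h1 h2 hne
    omega
  · intro h; rw [h]

-- ===== VERDICT (by name: the statement is the Claim_ definition above) =====
theorem findRestaurant_spec : Claim_equal_findRestaurant := by
  intro list1 list2 _ hpre
  obtain ⟨v, hv1, hv2, hmin⟩ := hpre
  unfold Spec_findRestaurant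
  rw [pvA_eq list1 list2 v hv1 hv2 hmin, pvB_eq list1 list2 v hv1 hv2 hmin]
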